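-- pv_equiv track=rewrite | github.com/didar-ali-deed/Identity-Verification-System | backend/app/services/pipeline/stage_5_similarity.py | _is_single_transposition
-- ===== SOURCE A (Python) =====
-- def _is_single_transposition(a: str, b: str) -> bool:
--     """Check if two strings differ by exactly one adjacent-character transposition."""
--     if len(a) != len(b):
--         return False
--
--     diffs = [(i, a[i], b[i]) for i in range(len(a)) if a[i] != b[i]]
--     if len(diffs) != 2:
--         return False
--
--     i1, i2 = diffs[0][0], diffs[1][0]
--     if i2 - i1 != 1:
--         return False
--
--     # Check that swapping fixes it
--     return a[i1] == b[i2] and a[i2] == b[i1]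
-- ===== SOURCE B (Python) =====
-- def _is_single_transposition(a: str, b: str) -> bool:
--     """Check if two strings differ by exactly one adjacent-character transposition."""
--     if len(a) != len(b):
--         return False
--     n = len(a)
--     i = 0
--     while i < n and a[i] == b[i]:
--         i += 1
--     if i >= n - 1:
--         return False
--     return a[i] == b[i + 1] and a[i + 1] == b[i] and a[i + 2:] == b[i + 2:]
-- ===== Notes on version B (the rewrite author's own statement) =====
-- stated objective: simpler
-- what changed: Instead of materialising a list of all differing positions and inspecting it, B scans for the first mismatch, stops there, checks the adjacent swap, and compares the remaining suffixes directly.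
import Mathlib
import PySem

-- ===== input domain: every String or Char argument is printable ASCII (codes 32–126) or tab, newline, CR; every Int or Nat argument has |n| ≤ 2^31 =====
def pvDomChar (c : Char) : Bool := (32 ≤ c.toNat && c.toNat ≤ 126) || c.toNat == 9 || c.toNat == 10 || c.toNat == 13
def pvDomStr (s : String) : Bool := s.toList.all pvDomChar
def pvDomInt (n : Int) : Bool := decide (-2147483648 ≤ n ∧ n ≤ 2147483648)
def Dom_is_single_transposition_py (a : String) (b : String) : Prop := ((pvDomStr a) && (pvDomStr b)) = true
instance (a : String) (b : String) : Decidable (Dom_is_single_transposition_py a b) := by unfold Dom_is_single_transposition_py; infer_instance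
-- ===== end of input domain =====

-- B replaces A's list of all differing positions by a first-mismatch scan with a
-- swap check and a direct suffix comparison (objective: simpler).

-- ===== PORT A =====
-- the comprehension [(i, a[i], b[i]) for i in range(len(a)) if a[i] != b[i]]
def pyDiffs (la lb : List Char) : List (Nat × Char × Char) :=
  (List.range la.length).filterMap (fun i =>
    if la.getD i ' ' ≠ lb.getD i ' ' then some (i, la.getD i ' ', lb.getD i ' ') else none)

def is_single_transposition_py (a : String) (b : String) : Bool :=
  let la := a.toList
  let lb := b.toList
  if la.length ≠ lb.length then false
  else
    match pyDiffs la lb with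
    | [d1, d2] =>
      -- i1, i2 = diffs[0][0], diffs[1][0]; if i2 - i1 != 1: return False
      if ((d2.1 : Int) - (d1.1 : Int)) ≠ 1 then false
      else (la.getD d1.1 ' ' == lb.getD d2.1 ' ') && (la.getD d2.1 ' ' == lb.getD d1.1 ' ')
    | _ => false  -- len(diffs) != 2

-- ===== PORT B =====
-- scan for the first mismatch; there, check the adjacent swap and compare the suffixes
def altScan : List Char → List Char → Bool
  | x :: xs, y :: ys =>
    if x = y then altScan xs ys
    else
      match xs, ys with
      | x2 :: xs', y2 :: ys' => (x == y2) && (x2 == y) && (xs' == ys')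
      | [], _ => false          -- mismatch at the last position (i >= n - 1)
      | _ :: _, [] => false
  | [], _ => false              -- no mismatch found
  | _ :: _, [] => false

def is_single_transposition_py_alt (a : String) (b : String) : Bool :=
  if a.toList.length ≠ b.toList.length then false
  else altScan a.toList b.toList

-- ===== PRECONDITION & SPEC =====
def Spec_is_single_transposition_py (a : String) (b : String) (out : Bool) : Prop := out = is_single_transposition_py_alt a b
instance (a : String) (b : String) (out : Bool) : Decidable (Spec_is_single_transposition_py a b out) := by unfold Spec_is_single_transposition_py; infer_instance

-- ===== CLAIM (what is proved, stated in full; the proofs are below) =====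
def Claim_equal_is_single_transposition_py : Prop := ∀ (a : String) (b : String), Dom_is_single_transposition_py a b → Spec_is_single_transposition_py a b (is_single_transposition_py a b)

-- ===== LEMMAS AND PROOFS =====

theorem pyDiffs_nil (lb : List Char) : pyDiffs [] lb = [] := rfl

theorem pyDiffs_cons (x y : Char) (xs ys : List Char) :
    pyDiffs (x :: xs) (y :: ys) =
      (if x ≠ y then [(0, x, y)] else []) ++ (pyDiffs xs ys).map (fun t => (t.1 + 1, t.2)) := by
  unfold pyDiffs
  simp only [List.length_cons, List.range_succ_eq_map, List.filterMap_cons,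
    List.filterMap_map, List.getD_cons_zero]
  split_ifs with h
  · simp only [List.singleton_append]
    congr 1
    rw [List.map_filterMap]
    refine List.filterMap_congr (fun i _ => ?_)
    by_cases hc : xs[i]?.getD ' ' = ys[i]?.getD ' ' <;>
      simp [Function.comp, Nat.succ_eq_add_one, hc]
  · simp only [List.nil_append]
    rw [List.map_filterMap]
    refine List.filterMap_congr (fun i _ => ?_)
    by_cases hc : xs[i]?.getD ' ' = ys[i]?.getD ' ' <;>
      simp [Function.comp, Nat.succ_eq_add_one, hc]

theorem pyDiffs_eq_nil (la lb : List Char) (h : la.length = lb.length) :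
    pyDiffs la lb = [] ↔ la = lb := by
  induction la generalizing lb with
  | nil => cases lb with
    | nil => simp [pyDiffs_nil]
    | cons y ys => simp at h
  | cons x xs ih =>
    cases lb with
    | nil => simp at h
    | cons y ys =>
      simp only [List.length_cons, Nat.add_right_cancel_iff] at h
      rw [pyDiffs_cons]
      by_cases hxy : x = y
      · simp [hxy, ih ys h]
      · simp [hxy]

-- A's core (after the length guard) as a function of the character lists (defeq to A's else-branch)
def aCore (la lb : List Char) : Bool :=
  match pyDiffs la lb with
  | [d1, d2] =>
    if ((d2.1 : Int) - (d1.1 : Int)) ≠ 1 then false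
    else (la.getD d1.1 ' ' == lb.getD d2.1 ' ') && (la.getD d2.1 ' ' == lb.getD d1.1 ' ')
  | _ => false

theorem altScan_cons_cons (x y x2 y2 : Char) (xs' ys' : List Char) :
    altScan (x :: x2 :: xs') (y :: y2 :: ys') =
      if x = y then altScan (x2 :: xs') (y2 :: ys')
      else ((x == y2) && (x2 == y) && (xs' == ys')) := rfl

theorem altScan_single (x y : Char) : altScan [x] [y] = false := by
  rcases eq_or_ne x y with h | h <;> simp [altScan, h]

theorem aCore_eq_altScan (la lb : List Char) (h : la.length = lb.length) :
    aCore la lb = altScan la lb := by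
  induction la generalizing lb with
  | nil =>
    cases lb with
    | nil => rfl
    | cons y ys => simp at h
  | cons x xs ih =>
    cases lb with
    | nil => simp at h
    | cons y ys =>
      simp only [List.length_cons, Nat.add_right_cancel_iff] at h
      by_cases hxy : x = y
      · -- first characters agree: both sides reduce to the tails
        subst hxy
        rw [show altScan (x :: xs) (x :: ys) = altScan xs ys by simp [altScan], ← ih ys h]
        unfold aCore
        rw [pyDiffs_cons]
        simp only [ne_eq, not_true_eq_false, if_false, List.nil_append]
        rcases hd : pyDiffs xs ys with _ | ⟨d1, _ | ⟨d2, _ | ⟨d3, tl⟩⟩⟩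
        · rfl
        · rfl
        · -- the two-diff branch: indices shift by one, the gap and the characters do not change
          simp only [List.map_cons, List.map_nil]
          have hc : (((d2.1 + 1 : Nat) : Int) - ((d1.1 + 1 : Nat) : Int) = 1) ↔
              ((d2.1 : Int) - (d1.1 : Int) = 1) := by push_cast; constructor <;> intro <;> omega
          by_cases hgap : ((d2.1 : Int) - (d1.1 : Int)) = 1
          · simp [hgap]
          · simp [hgap]
        · rfl
      · -- first mismatch at index 0
        cases xs with
        | nil =>
          cases ys with
          | nil =>
            rw [altScan_single]
            unfold aCore
            rw [pyDiffs_cons, pyDiffs_nil]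
            simp [hxy]
          | cons y2 ys' => simp at h
        | cons x2 xs' =>
          cases ys with
          | nil => simp at h
          | cons y2 ys' =>
            simp only [List.length_cons, Nat.add_right_cancel_iff] at h
            rw [altScan_cons_cons, if_neg hxy]
            unfold aCore
            rw [pyDiffs_cons, pyDiffs_cons]
            by_cases h22 : x2 = y2
            · -- second position agrees: any remaining diff sits at index ≥ 2, and the swap check fails
              subst h22
              have hr : ((x == x2) && (x2 == y) && (xs' == ys')) = false := by
                by_cases h1 : x = x2
                · by_cases h2 : x2 = y
                  · exact absurd (h1.trans h2) hxy
                  · simp [h2]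
                · simp [h1]
              rw [hr]
              simp only [ne_eq, hxy, not_false_eq_true, if_true, not_true_eq_false, if_false,
                List.nil_append, List.map_map, List.singleton_append]
              rcases hd : pyDiffs xs' ys' with _ | ⟨d1, _ | ⟨d2, tl⟩⟩
              · rfl
              · -- one further diff, at index d1.1 + 2: the gap from 0 is ≥ 2, so A returns false
                simp only [List.map_cons, List.map_nil]
                simp
                intro h1
                exact absurd h1 (by omega)
              · rfl
            · -- second position also differs: the first two diffs are at 0 and 1
              simp only [ne_eq, hxy, h22, not_false_eq_true, if_true,
                List.map_cons, List.cons_append]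
              rcases hd : pyDiffs xs' ys' with _ | ⟨d1, tl⟩
              · -- exactly two diffs: A checks the swap at indices 0 and 1
                simp [(pyDiffs_eq_nil xs' ys' h).mp hd, Bool.and_comm]
              · -- a third diff exists, so the tails differ too
                have hne : xs' ≠ ys' := by
                  intro he
                  rw [(pyDiffs_eq_nil xs' ys' h).mpr he] at hd
                  cases hd
                simp [hne]

-- ===== VERDICT (by name: the statement is the Claim_ definition above) =====
theorem is_single_transposition_py_spec : Claim_equal_is_single_transposition_py := by
  intro a b _
  unfold Spec_is_single_transposition_py is_single_transposition_py_alt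
  rw [show is_single_transposition_py a b =
        (if a.toList.length ≠ b.toList.length then false else aCore a.toList b.toList) from rfl]
  by_cases h : a.toList.length = b.toList.length
  · rw [if_neg (fun hc => hc h), if_neg (fun hc => hc h)]
    exact aCore_eq_altScan a.toList b.toList h
  · rw [if_pos h, if_pos h]
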